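-- pv_equiv track=rewrite | github.com/LLagoon3/Programmers | Python3/Level_1/코딩테스트 연습 연습문제 과일 장수.py | solution
-- ===== SOURCE A (Python) =====
-- def solution(k, m, score):
--     score = sorted(score)
--     cnt, res = 0, 0
--     while score:
--         cnt += 1
--         if cnt == m:
--             cnt, res = 0, res + (score.pop() * m)
--         else:
--             score.pop()
--     return res
-- ===== SOURCE B (Python) =====
-- def solution(k, m, score):
--     # Each full box of m fruits is priced m * (minimum score in the box); the best
--     # grouping takes the m largest together, then the next m, etc.  So sort once and
--     # read each group's minimum directly by index from the top end; k and any
--     # leftover fruits are irrelevant.  Non-positive box size sells nothing.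
--     if m <= 0:
--         return 0
--     s = sorted(score)
--     n = len(s)
--     return sum(m * s[n - (g + 1) * m] for g in range(n // m))
-- ===== Notes on version B (the rewrite author's own statement) =====
-- stated objective: simpler
-- what changed: Replaces the destructive pop-one-at-a-time loop with counter state by a single closed-form pass over the sorted list that sums m * s[n-(g+1)*m], reading each m-group's minimum directly by index.
import Mathlib
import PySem

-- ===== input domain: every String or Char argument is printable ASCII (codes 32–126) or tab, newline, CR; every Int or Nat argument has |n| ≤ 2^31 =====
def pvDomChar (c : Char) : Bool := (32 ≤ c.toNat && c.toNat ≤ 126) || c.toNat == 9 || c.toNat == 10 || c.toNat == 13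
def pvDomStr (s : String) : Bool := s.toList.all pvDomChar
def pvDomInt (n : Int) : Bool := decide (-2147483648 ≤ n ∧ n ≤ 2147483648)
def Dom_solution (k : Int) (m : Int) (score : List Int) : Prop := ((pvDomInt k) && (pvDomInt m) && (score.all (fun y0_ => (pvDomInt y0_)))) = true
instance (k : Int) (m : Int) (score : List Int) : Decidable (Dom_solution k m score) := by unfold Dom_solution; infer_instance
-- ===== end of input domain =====

-- B replaces A's destructive pop-by-pop loop with counter state by direct indexed
-- access to each m-group's minimum in the sorted list (simpler decomposition;
-- return value only — A also consumes its local sorted copy, which no caller sees).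

-- ===== PORT A =====
-- while score: cnt += 1; if cnt == m: cnt, res = 0, res + score.pop()*m else: score.pop()
def solutionLoop (m : Int) : List Int → Int → Int → Int
  | [], _, res => res
  | (h :: t), cnt, res =>
    if cnt + 1 = m then
      solutionLoop m (h :: t).dropLast 0 (res + (h :: t).getLast (by simp) * m)
    else
      solutionLoop m (h :: t).dropLast (cnt + 1) res
  termination_by s _ _ => s.length
  decreasing_by all_goals simp

def solution (k : Int) (m : Int) (score : List Int) : Int :=
  solutionLoop m (PySem.List.sorted score (fun x => x) false) 0 0

-- ===== PORT B =====
def solution_alt (k : Int) (m : Int) (score : List Int) : Int :=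
  if m ≤ 0 then 0
  else
    let s := PySem.List.sorted score (fun x => x) false
    let n : Int := s.length
    -- s[n - (g+1)*m]: the index is always in range for g ∈ range(n // m), m ≥ 1
    (PySem.List.pyRange 0 (PySem.Int.floordiv n m) 1).foldl
      (fun acc g => acc + m * PySem.List.pyGetD s (n - (g + 1) * m) 0) 0

-- ===== PRECONDITION & SPEC =====
def Spec_solution (k : Int) (m : Int) (score : List Int) (out : Int) : Prop := out = solution_alt k m score
instance (k : Int) (m : Int) (score : List Int) (out : Int) : Decidable (Spec_solution k m score out) := by unfold Spec_solution; infer_instance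

-- ===== CLAIM (what is proved, stated in full; the proofs are below) =====
def Claim_equal_solution : Prop := ∀ (k : Int) (m : Int) (score : List Int), Dom_solution k m score → Spec_solution k m score (solution k m score)

-- ===== LEMMAS AND PROOFS =====

-- unfolding for a nonempty list, stated without the cons pattern
theorem solutionLoop_ne_nil (m : Int) (s : List Int) (hs : s ≠ []) (cnt res : Int) :
    solutionLoop m s cnt res =
      if cnt + 1 = m then
        solutionLoop m s.dropLast 0 (res + s.getLast hs * m)
      else
        solutionLoop m s.dropLast (cnt + 1) res := by
  cases s with
  | nil => exact absurd rfl hs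
  | cons h t => simp [solutionLoop]

-- once cnt ≥ m the counter can never hit m again: everything is popped, res unchanged
theorem solutionLoop_ge (m : Int) (s : List Int) (cnt res : Int) (h : m ≤ cnt) :
    solutionLoop m s cnt res = res := by
  induction s using List.reverseRecOn generalizing cnt with
  | nil => simp [solutionLoop]
  | append_singleton l a ih =>
    rw [solutionLoop_ne_nil m (l ++ [a]) (by simp) cnt res]
    rw [if_neg (by omega)]
    simpa using ih (cnt + 1) (by omega)

-- fewer than m - cnt elements left: the counter never reaches m, res unchanged
theorem solutionLoop_short (m : Int) (s : List Int) (cnt res : Int)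
    (h : (s.length : Int) < m - cnt) :
    solutionLoop m s cnt res = res := by
  induction s using List.reverseRecOn generalizing cnt with
  | nil => simp [solutionLoop]
  | append_singleton l a ih =>
    rw [solutionLoop_ne_nil m (l ++ [a]) (by simp) cnt res]
    rw [if_neg (by simp at h; omega)]
    rw [List.dropLast_concat]
    exact ih (cnt + 1) (by simp at h ⊢; omega)

-- peel one full group of j = m - cnt pops: the j-th pop contributes s[len-j]*m
theorem solutionLoop_peel (m : Int) (j : ℕ) (h1 : 1 ≤ j) :
    ∀ (s : List Int) (cnt res : Int), cnt + (j : Int) = m → j ≤ s.length →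
      solutionLoop m s cnt res =
        solutionLoop m (s.take (s.length - j)) 0 (res + s.getD (s.length - j) 0 * m) := by
  induction j with
  | zero => omega
  | succ j ih =>
    intro s cnt res hcnt hlen
    have hs : s ≠ [] := by cases s <;> simp_all
    rw [solutionLoop_ne_nil m s hs cnt res]
    cases Nat.eq_or_lt_of_le h1 with
    | inl h0 =>
      -- j + 1 = 1 : this pop is the contributing one
      have hj : j = 0 := by omega
      subst hj
      rw [if_pos (by omega)]
      rw [List.dropLast_eq_take]
      congr 2
      rw [List.getLast_eq_getElem, List.getD_eq_getElem s 0 (by omega)]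
    | inr h2 =>
      rw [if_neg (by omega)]
      have hlen' : s.dropLast.length = s.length - 1 := by simp
      rw [ih (by omega) s.dropLast (cnt + 1) res (by omega) (by omega)]
      have e1 : s.dropLast.length - j = s.length - (j + 1) := by omega
      have hidx : s.length - (j + 1) < s.length - 1 := by omega
      rw [e1, List.dropLast_eq_take, List.take_take]
      have hmin : min (s.length - (j + 1)) (s.length - 1) = s.length - (j + 1) := by omega
      have hgd : (s.take (s.length - 1)).getD (s.length - (j + 1)) 0
          = s.getD (s.length - (j + 1)) 0 := by
        rw [List.getD_eq_getElem _ _ (by simp; omega), List.getD_eq_getElem s _ (by omega)]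
        exact List.getElem_take
      rw [hmin, hgd]
-- the strided-sum body of B, over List.range
def groupTerm (m : Int) (s : List Int) (kk : ℕ) : Int :=
  m * PySem.List.pyGetD s ((s.length : Int) - ((kk : Int) + 1) * m) 0

-- main invariant: A's loop from cnt = 0 computes B's group sum
theorem solutionLoop_eq_sum (m : Int) (hm : 1 ≤ m) :
    ∀ (N : ℕ) (s : List Int), s.length = N → ∀ res : Int,
      solutionLoop m s 0 res = res + ((List.range (s.length / m.toNat)).map (groupTerm m s)).sum := by
  intro N
  induction N using Nat.strong_induction_on with
  | _ N ih =>
    intro s hN res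
    have hmn : 1 ≤ m.toNat := by omega
    by_cases hsmall : s.length < m.toNat
    · rw [Nat.div_eq_of_lt hsmall]
      simp
      exact solutionLoop_short m s 0 res (by omega)
    · rw [not_lt] at hsmall
      have hq : s.length / m.toNat = (s.length - m.toNat) / m.toNat + 1 := by
        rw [Nat.div_eq_sub_div (by omega) hsmall]
      rw [solutionLoop_peel m m.toNat (by omega) s 0 res (by omega) hsmall]
      set s' := s.take (s.length - m.toNat) with hs'
      have hlen' : s'.length = s.length - m.toNat := by
        simp [hs']
      rw [ih s'.length (by omega) s' rfl]
      rw [hq, List.range_succ_eq_map, List.map_cons, List.sum_cons, hlen']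
      have hm' : (m.toNat : Int) = m := Int.toNat_of_nonneg (by omega)
      have hterm0 : s.getD (s.length - m.toNat) 0 * m = groupTerm m s 0 := by
        unfold groupTerm
        simp only [Nat.cast_zero]
        have : (s.length : Int) - (0 + 1) * m = ((s.length - m.toNat : ℕ) : Int) := by
          push_cast [hm']; omega
        rw [this, PySem.List.pyGetD_natCast]
        ring
      have hshift : (List.range ((s.length - m.toNat) / m.toNat)).map (groupTerm m s') =
          ((List.range ((s.length - m.toNat) / m.toNat)).map (fun i => i + 1)).map (groupTerm m s) := by
        rw [List.map_map]
        apply List.map_congr_left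
        intro kk hkk
        simp only [List.mem_range] at hkk
        have hkb : (kk + 1) * m.toNat ≤ s.length - m.toNat :=
          (Nat.le_div_iff_mul_le (by omega)).mp (by omega)
        unfold groupTerm
        simp only [Function.comp_apply]
        have hmul : (((kk + 1) * m.toNat : ℕ) : Int) = ((kk : Int) + 1) * m := by
          push_cast [hm']; ring
        have h2 : (((kk + 1 : ℕ) : Int) + 1) * m = ((kk : Int) + 1) * m + m := by
          push_cast; ring
        have hidx : (s'.length : Int) - ((kk : Int) + 1) * m =
            ((s.length - m.toNat - (kk + 1) * m.toNat : ℕ) : Int) := by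
          rw [hlen']; omega
        have hsub : ((s.length - m.toNat - (kk + 1) * m.toNat : ℕ) : Int) =
            (s.length : Int) - (m.toNat : Int) - (((kk + 1) * m.toNat : ℕ) : Int) := by
          omega
        have hidx2 : (s.length : Int) - (((kk + 1 : ℕ) : Int) + 1) * m =
            ((s.length - m.toNat - (kk + 1) * m.toNat : ℕ) : Int) := by
          rw [hsub, hmul, hm']; push_cast; ring
        rw [hidx, hidx2, PySem.List.pyGetD_natCast, PySem.List.pyGetD_natCast]
        congr 1
        have hpos : 0 < (kk + 1) * m.toNat := Nat.mul_pos (by omega) (by omega)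
        have hlt : s.length - m.toNat - (kk + 1) * m.toNat < s'.length := by
          rw [hlen']; omega
        rw [List.getD_eq_getElem s' _ hlt, List.getD_eq_getElem s _ (by omega)]
        exact List.getElem_take
      rw [hshift, hterm0]
      ring

-- ===== VERDICT (by name: the statement is the Claim_ definition above) =====
theorem solution_spec : Claim_equal_solution := by
  intro k m score _
  unfold Spec_solution solution solution_alt
  set s := PySem.List.sorted score (fun x => x) false with hs
  by_cases hm : m ≤ 0
  · rw [if_pos hm]
    exact solutionLoop_ge m s 0 0 hm
  · rw [if_neg hm]
    rw [not_le] at hm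
    have hm1 : 1 ≤ m := hm
    rw [solutionLoop_eq_sum m hm1 s.length s rfl 0]
    have hmcast : m = ((m.toNat : ℕ) : Int) := by omega
    rw [PySem.List.foldl_add]
    rw [show PySem.Int.floordiv (s.length : Int) m = ((s.length / m.toNat : ℕ) : Int) by
      rw [hmcast]; exact PySem.Int.floordiv_natCast _ _]
    rw [PySem.List.pyRange_one]
    simp only [Int.sub_zero, Int.toNat_natCast]
    rw [List.map_map]
    congr 1
    refine congrArg List.sum (List.map_congr_left ?_)
    intro kk _
    simp [groupTerm]
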